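-- pv_equiv track=rewrite | github.com/cry999/AtCoder | beginner/047/D.py | an_invisible_hand
-- ===== SOURCE A (Python) =====
-- def an_invisible_hand(N: int, T: int, A: list) -> int:
--     max_profit = 0
--     max_profit_pair_num = 0
--     min_price = A[0]
--
--     for price in A[1:]:
--         # 今まで訪れた街の中で最安値で買えるところで買えるだけ
--         # 買って今いる街で全て売ると仮定して利益を算出
--         profit = price - min_price
--
--         if max_profit < profit:
--             # 利益の最大値を更新できるなら更新する。
--             max_profit = profit
--             max_profit_pair_num = 1
--         elif max_profit == profit:
--             # 最大利益を出せる街のペアに対して操作を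
--             # 行うので、その数を保持する。
--             max_profit_pair_num += 1
--
--         min_price = min(min_price, price)
--
--     # 最大利益を出せる街のペアに対して、最高値を 1 下げるか最安値を 1 あげるか
--     # すれば利益を 1 円減らせる。ただ、一つのペアを変更してもそのほかのペアが残
--     # っていればそのペアを利用して最高利益をあげられるので全ペアに同じ操作が必要
--     # 。結局、最大利益をあげるペアの数が最小操作回数で、それらに 1 の変化を与え
--     # れば良いので最小コストでもある。
--     return max_profit_pair_num
-- ===== SOURCE B (Python) =====
-- def an_invisible_hand(N: int, T: int, A: list) -> int:
--     # table-then-reduce: prefix minima, profit table, then max/count reductions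
--     prefix = []
--     pm = A[0]
--     for p in A:
--         pm = min(pm, p)
--         prefix.append(pm)
--     profits = [p - m for p, m in zip(A[1:], prefix)]
--     best = max([0] + profits)
--     return profits.count(best)
-- ===== Notes on version B (the rewrite author's own statement) =====
-- stated objective: alternative
-- what changed: Replaces the fused single pass (running min with inline max-update/count-reset branches) by a table-then-reduce structure: build the prefix-minimum table, derive the profit table, then take max([0]+profits) and count it.
-- outside the precondition, e.g. on an_invisible_hand(0, 0, []): A raises IndexError, B raises IndexError
import Mathlib
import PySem

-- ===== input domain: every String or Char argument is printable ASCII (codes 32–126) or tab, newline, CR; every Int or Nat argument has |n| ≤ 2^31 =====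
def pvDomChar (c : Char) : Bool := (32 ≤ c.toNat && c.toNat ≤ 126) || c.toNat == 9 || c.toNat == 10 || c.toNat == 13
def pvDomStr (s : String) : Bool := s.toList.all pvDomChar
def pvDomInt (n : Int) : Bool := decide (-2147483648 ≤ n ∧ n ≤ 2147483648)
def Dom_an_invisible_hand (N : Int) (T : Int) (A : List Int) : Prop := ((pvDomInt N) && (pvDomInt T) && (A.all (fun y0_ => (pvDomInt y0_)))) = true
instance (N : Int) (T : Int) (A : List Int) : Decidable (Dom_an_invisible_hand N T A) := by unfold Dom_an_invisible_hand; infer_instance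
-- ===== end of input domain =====

-- B replaces A's fused single pass by a prefix-min table, a profit table and max/count reductions (alternative decomposition, same cost).
-- Both programs raise IndexError on A = [] (A[0]); Pre_ excludes exactly that.

-- ===== PORT A =====
-- A's single loop over A[1:] with state (max_profit, max_profit_pair_num, min_price).
def an_invisible_hand (N : Int) (T : Int) (A : List Int) : Int :=
  match PySem.List.pyGet? A 0 with
  | none => 0  -- unreachable under Pre_: Python raises IndexError here
  | some a0 =>
    let s := (PySem.List.slice A (some 1) none).foldl
      (fun (st : Int × Int × Int) price =>
        let profit := price - st.2.2
        let st' :=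
          if st.1 < profit then (profit, (1 : Int))
          else if st.1 = profit then (st.1, st.2.1 + 1)
          else (st.1, st.2.1)
        (st'.1, st'.2, min st.2.2 price))
      ((0 : Int), (0 : Int), a0)
    s.2.1

-- ===== PORT B =====
def an_invisible_hand_alt (N : Int) (T : Int) (A : List Int) : Int :=
  match PySem.List.pyGet? A 0 with
  | none => 0  -- unreachable under Pre_: Python raises IndexError here
  | some a0 =>
    let pmins := (A.foldl (fun (acc : List Int × Int) p =>
        let pm := min acc.2 p
        (acc.1 ++ [pm], pm)) ([], a0)).1
    let profits := List.zipWith (fun p m => p - m) (PySem.List.slice A (some 1) none) pmins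
    let best := ((0 : Int) :: profits).foldl max 0
    ((profits.count best : Nat) : Int)

-- ===== PRECONDITION & SPEC =====
-- A (and B) raise IndexError on A = [] via A[0]; that is the only exclusion.
def Pre_an_invisible_hand (N : Int) (T : Int) (A : List Int) : Prop := A ≠ []
instance (N : Int) (T : Int) (A : List Int) : Decidable (Pre_an_invisible_hand N T A) := by unfold Pre_an_invisible_hand; infer_instance
def pvWitness_an_invisible_hand : Int × Int × List Int := (4, 2, [3, 1, 4, 1])

def Spec_an_invisible_hand (N : Int) (T : Int) (A : List Int) (out : Int) : Prop := out = an_invisible_hand_alt N T A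
instance (N : Int) (T : Int) (A : List Int) (out : Int) : Decidable (Spec_an_invisible_hand N T A out) := by unfold Spec_an_invisible_hand; infer_instance

-- ===== CLAIM (what is proved, stated in full; the proofs are below) =====
def Claim_equal_an_invisible_hand : Prop := ∀ (N : Int) (T : Int) (A : List Int), Dom_an_invisible_hand N T A → Pre_an_invisible_hand N T A → Spec_an_invisible_hand N T A (an_invisible_hand N T A)

-- ===== LEMMAS AND PROOFS =====

/-- The profit sequence with running minimum `m`. -/
def profitsFrom (m : Int) : List Int → List Int
  | [] => []
  | p :: t => (p - m) :: profitsFrom (min m p) t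

/-- The list of prefix minima starting from `m`. -/
def prefixMins (m : Int) : List Int → List Int
  | [] => []
  | p :: t => min m p :: prefixMins (min m p) t

lemma b_prefix_fold (l : List Int) : ∀ (acc : List Int) (m : Int),
    (l.foldl (fun (acc : List Int × Int) p =>
        let pm := min acc.2 p
        (acc.1 ++ [pm], pm)) (acc, m)).1 = acc ++ prefixMins m l := by
  induction l with
  | nil => intro acc m; simp [prefixMins]
  | cons p t ih =>
      intro acc m
      simp only [List.foldl_cons, prefixMins]
      rw [ih]
      simp

lemma zip_prefix_eq_profits (t : List Int) : ∀ (m : Int),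
    List.zipWith (fun p q => p - q) t (m :: prefixMins m t) = profitsFrom m t := by
  induction t with
  | nil => intro m; simp [profitsFrom]
  | cons p t ih =>
      intro m
      simp only [List.zipWith, profitsFrom, prefixMins]
      rw [ih]

lemma le_foldl_max (l : List Int) : ∀ a : Int, a ≤ l.foldl max a := by
  induction l with
  | nil => intro a; simp
  | cons p t ih =>
      intro a
      simpa using le_trans (le_max_left a p) (ih (max a p))

/-- A's fold, written as structural recursion for the induction. -/
def aFold (mp cnt m : Int) : List Int → Int
  | [] => cnt
  | price :: t =>
      let profit := price - m
      if mp < profit then aFold profit 1 (min m price) t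
      else if mp = profit then aFold mp (cnt + 1) (min m price) t
      else aFold mp cnt (min m price) t

lemma aFold_eq_foldl (l : List Int) : ∀ (mp cnt m : Int),
    (l.foldl (fun (st : Int × Int × Int) price =>
        let profit := price - st.2.2
        let st' :=
          if st.1 < profit then (profit, (1 : Int))
          else if st.1 = profit then (st.1, st.2.1 + 1)
          else (st.1, st.2.1)
        (st'.1, st'.2, min st.2.2 price)) (mp, cnt, m)).2.1 = aFold mp cnt m l := by
  induction l with
  | nil => intro mp cnt m; simp [aFold]
  | cons p t ih =>
      intro mp cnt m
      simp only [List.foldl_cons, aFold]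
      split_ifs <;> rw [ih]

lemma aFold_count (l : List Int) : ∀ (mp cnt m : Int),
    aFold mp cnt m l =
      (let Q := profitsFrom m l
       let M := Q.foldl max mp
       if mp < M then ((Q.count M : Nat) : Int) else cnt + ((Q.count M : Nat) : Int)) := by
  induction l with
  | nil =>
      intro mp cnt m
      simp [aFold, profitsFrom]
  | cons p t ih =>
      intro mp cnt m
      simp only [aFold, profitsFrom, List.foldl_cons]
      by_cases h1 : mp < p - m
      · rw [if_pos h1, ih]
        have hmax : max mp (p - m) = p - m := max_eq_right (le_of_lt h1)
        rw [hmax]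
        set Q := profitsFrom (min m p) t with hQ
        set M := Q.foldl max (p - m) with hM
        have hple : p - m ≤ M := by
          rw [hM]; exact le_foldl_max _ _
        have hmpM : mp < M := lt_of_lt_of_le h1 hple
        rw [if_pos hmpM]
        by_cases h2 : p - m < M
        · rw [if_pos h2]
          have : (p - m) ≠ M := ne_of_lt h2
          simp [List.count_cons, this, ← hM]
        · rw [if_neg h2]
          have hEq : p - m = M := le_antisymm hple (not_lt.mp h2)
          rw [hEq] at hM
          simp [List.count_cons, hEq, ← hM, add_comm]
      · rw [if_neg h1]
        have hmax : max mp (p - m) = mp := max_eq_left (not_lt.mp h1)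
        by_cases h2 : mp = p - m
        · rw [if_pos h2, ih, hmax]
          set Q := profitsFrom (min m p) t with hQ
          set M := Q.foldl max mp with hM
          have hmpM : mp ≤ M := by
            rw [hM]; exact le_foldl_max _ _
          by_cases h3 : mp < M
          · rw [if_pos h3, if_pos h3]
            have : (p - m) ≠ M := by rw [← h2]; exact ne_of_lt h3
            simp [List.count_cons, this, ← hM]
          · rw [if_neg h3, if_neg h3]
            have hEq : mp = M := le_antisymm hmpM (not_lt.mp h3)
            have : (p - m) = M := h2 ▸ hEq
            simp [List.count_cons, this, ← hM]
            ring
        · rw [if_neg h2, ih, hmax]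
          set Q := profitsFrom (min m p) t with hQ
          set M := Q.foldl max mp with hM
          have hmpM : mp ≤ M := by
            rw [hM]; exact le_foldl_max _ _
          have hlt : p - m < M := lt_of_lt_of_le (lt_of_le_of_ne (not_lt.mp h1) (Ne.symm h2)) hmpM
          have hne : (p - m) ≠ M := ne_of_lt hlt
          by_cases h3 : mp < M
          · rw [if_pos h3, if_pos h3]; simp [List.count_cons, hne, ← hM]
          · rw [if_neg h3, if_neg h3]; simp [List.count_cons, hne, ← hM]

-- ===== VERDICT (by name: the statement is the Claim_ definition above) =====
theorem an_invisible_hand_spec : Claim_equal_an_invisible_hand := by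
  intro N T A _ hpre
  obtain ⟨a0, t, rfl⟩ : ∃ a0 t, A = a0 :: t := by
    cases A with
    | nil => exact absurd rfl hpre
    | cons a t => exact ⟨a, t, rfl⟩
  unfold Spec_an_invisible_hand an_invisible_hand an_invisible_hand_alt
  have hget : PySem.List.pyGet? (a0 :: t) (0 : Int) = some a0 := by
    simp [PySem.List.pyGet?, PySem.List.pyIdx?]
  rw [hget]
  simp only [PySem.List.slice_from_one, List.tail_cons]
  rw [aFold_eq_foldl, b_prefix_fold]
  have hpm : prefixMins a0 (a0 :: t) = a0 :: prefixMins a0 t := by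
    simp [prefixMins]
  rw [List.nil_append, hpm, zip_prefix_eq_profits, aFold_count]
  simp only [List.foldl_cons, max_self]
  split_ifs <;> simp
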